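-- pv_equiv track=rewrite | github.com/zby/DayDreamingDayDreaming | scripts/find_malformed_legacy_links.py | _infer_template_from_id
-- ===== SOURCE A (Python) =====
-- from typing import Dict, List, Optional, Tuple
--
-- def _infer_template_from_id(doc_id: str, known_templates: List[str], model_ids: List[str]) -> Optional[str]:
--     base = doc_id
--     for mid in sorted(model_ids, key=len, reverse=True):
--         suf = "_" + mid
--         if base.endswith(suf):
--             base = base[: -len(suf)]
--             break
--     for tpl in sorted(known_templates, key=len, reverse=True):
--         suf = "_" + tpl
--         if base.endswith(suf):
--             return tpl
--     return None
-- ===== SOURCE B (Python) =====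
-- from typing import List, Optional
--
-- def _infer_template_from_id(doc_id: str, known_templates: List[str], model_ids: List[str]) -> Optional[str]:
--     base = doc_id
--     best_mid = None
--     for mid in model_ids:
--         if base.endswith("_" + mid) and (best_mid is None or len(mid) > len(best_mid)):
--             best_mid = mid
--     if best_mid is not None:
--         base = base[: -(len(best_mid) + 1)]
--     best_tpl = None
--     for tpl in known_templates:
--         if base.endswith("_" + tpl) and (best_tpl is None or len(tpl) > len(best_tpl)):
--             best_tpl = tpl
--     return best_tpl
-- ===== Notes on version B (the rewrite author's own statement) =====
-- stated objective: simpler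
-- what changed: B drops both length-descending sorts and instead makes one pass over model_ids and one over known_templates, tracking the longest matching '_'-suffix with a strict '>' so the first longest match wins, which coincides with A's sorted first-match choice because equal-length matching suffixes of the same string are identical.
import Mathlib
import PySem

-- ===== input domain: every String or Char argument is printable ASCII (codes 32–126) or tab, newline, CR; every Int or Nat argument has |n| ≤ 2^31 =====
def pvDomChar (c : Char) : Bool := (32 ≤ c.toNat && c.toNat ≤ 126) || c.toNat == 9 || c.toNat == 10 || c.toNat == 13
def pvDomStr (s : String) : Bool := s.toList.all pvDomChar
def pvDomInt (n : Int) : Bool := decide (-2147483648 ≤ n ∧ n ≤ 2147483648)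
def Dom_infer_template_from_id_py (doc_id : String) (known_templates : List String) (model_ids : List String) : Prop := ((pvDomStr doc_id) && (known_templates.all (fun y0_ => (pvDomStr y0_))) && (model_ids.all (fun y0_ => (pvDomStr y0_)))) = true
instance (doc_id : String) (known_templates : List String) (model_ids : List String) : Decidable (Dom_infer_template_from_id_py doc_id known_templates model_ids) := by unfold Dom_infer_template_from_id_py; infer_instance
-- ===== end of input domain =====

-- B replaces A's two sorts + first-match scans by two single passes that track the longest
-- matching suffix with a strict '>' comparison (objective: simpler — no sorting needed).

-- ===== PORT A =====
-- first loop of A: iterate the length-desc-sorted model ids, strip at the first matching suffix and break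
def pvAStripLoop (base : String) : List String → String
  | [] => base
  | mid :: rest =>
    if PySem.Str.endswith base ("_" ++ mid) then
      PySem.Str.slice base none (some (-(PySem.Str.len ("_" ++ mid) : Int)))
    else pvAStripLoop base rest

-- second loop of A: return the first template whose "_"+tpl is a suffix
def pvAFindLoop (base : String) : List String → Option String
  | [] => none
  | tpl :: rest =>
    if PySem.Str.endswith base ("_" ++ tpl) then some tpl
    else pvAFindLoop base rest

def infer_template_from_id_py (doc_id : String) (known_templates : List String) (model_ids : List String) : Option String :=
  let base := pvAStripLoop doc_id (PySem.List.sorted model_ids (fun m => PySem.Str.len m) true)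
  pvAFindLoop base (PySem.List.sorted known_templates (fun t => PySem.Str.len t) true)

-- ===== PORT B =====
-- one pass keeping the longest x with base.endswith("_"+x); strict '>' so the first longest wins
def pvBBest (base : String) (xs : List String) : Option String :=
  xs.foldl (fun best x =>
    if PySem.Str.endswith base ("_" ++ x) &&
       (match best with
        | none => true
        | some b => decide (PySem.Str.len b < PySem.Str.len x))
    then some x else best) none

def infer_template_from_id_py_alt (doc_id : String) (known_templates : List String) (model_ids : List String) : Option String :=
  let base :=
    match pvBBest doc_id model_ids with
    | some b => PySem.Str.slice doc_id none (some (-((PySem.Str.len b : Int) + 1)))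
    | none => doc_id
  pvBBest base known_templates

-- ===== PRECONDITION & SPEC =====
def Spec_infer_template_from_id_py (doc_id : String) (known_templates : List String) (model_ids : List String) (out : Option String) : Prop := out = infer_template_from_id_py_alt doc_id known_templates model_ids
instance (doc_id : String) (known_templates : List String) (model_ids : List String) (out : Option String) : Decidable (Spec_infer_template_from_id_py doc_id known_templates model_ids out) := by unfold Spec_infer_template_from_id_py; infer_instance

-- ===== CLAIM (what is proved, stated in full; the proofs are below) =====
def Claim_equal_infer_template_from_id_py : Prop := ∀ (doc_id : String) (known_templates : List String) (model_ids : List String), Dom_infer_template_from_id_py doc_id known_templates model_ids → Spec_infer_template_from_id_py doc_id known_templates model_ids (infer_template_from_id_py doc_id known_templates model_ids)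

-- ===== LEMMAS AND PROOFS =====

-- proof-side name for B's fold step
def pvStep (base : String) (best : Option String) (x : String) : Option String :=
  if PySem.Str.endswith base ("_" ++ x) &&
     (match best with
      | none => true
      | some b => decide (PySem.Str.len b < PySem.Str.len x))
  then some x else best

theorem pvBBest_eq (base : String) (xs : List String) :
    pvBBest base xs = xs.foldl (pvStep base) none := rfl

-- suffixes of the same list with equal lengths coincide
theorem pv_suffix_eq_of_length {α : Type} {s t u : List α} (h1 : t <:+ s) (h2 : u <:+ s)
    (h : t.length = u.length) : t = u := by
  obtain ⟨a, rfl⟩ := h1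
  obtain ⟨b, hb⟩ := h2
  have hlen : b.length = a.length := by
    have := congrArg List.length hb
    simp at this; omega
  exact (List.append_inj hb.symm (by omega)).2

-- a matching "_"-suffix is determined by its length
theorem pv_match_eq (base x y : String)
    (hx : PySem.Str.endswith base ("_" ++ x) = true)
    (hy : PySem.Str.endswith base ("_" ++ y) = true)
    (h : PySem.Str.len x = PySem.Str.len y) : x = y := by
  rw [PySem.Str.endswith_eq, PySem.Chars.endswith_iff, String.toList_append] at hx hy
  have := pv_suffix_eq_of_length hx hy (by simp [PySem.Str.len_eq] at h; simp [h])
  exact String.toList_inj.mp (by simpa using this)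

-- A's template loop is List.find?
theorem pvAFindLoop_eq_find? (base : String) (l : List String) :
    pvAFindLoop base l = l.find? (fun x => PySem.Str.endswith base ("_" ++ x)) := by
  induction l with
  | nil => rfl
  | cons x l ih =>
    simp only [pvAFindLoop]
    by_cases h : PySem.Str.endswith base ("_" ++ x) = true
    · rw [if_pos h, List.find?_cons_of_pos (by simpa using h)]
    · rw [if_neg h, List.find?_cons_of_neg (by simpa using h), ih]

-- A's strip loop in terms of List.find?
theorem pvAStripLoop_eq_find? (base : String) (l : List String) :
    pvAStripLoop base l =
      match l.find? (fun x => PySem.Str.endswith base ("_" ++ x)) with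
      | some a => PySem.Str.slice base none (some (-(PySem.Str.len ("_" ++ a) : Int)))
      | none => base := by
  induction l with
  | nil => rfl
  | cons x l ih =>
    simp only [pvAStripLoop]
    by_cases h : PySem.Str.endswith base ("_" ++ x) = true
    · rw [if_pos h, List.find?_cons_of_pos (by simpa using h)]
    · rw [if_neg h, List.find?_cons_of_neg (by simpa using h), ih]

-- on a length-descending list, the first match is a longest match
theorem pv_find?_max (base : String) (l : List String) (a : String)
    (hp : l.Pairwise (fun u v => PySem.Str.len v ≤ PySem.Str.len u))
    (hf : l.find? (fun x => PySem.Str.endswith base ("_" ++ x)) = some a) :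
    ∀ x ∈ l, PySem.Str.endswith base ("_" ++ x) = true → PySem.Str.len x ≤ PySem.Str.len a := by
  induction l with
  | nil => simp at hf
  | cons y l ih =>
    rw [List.pairwise_cons] at hp
    by_cases h : PySem.Str.endswith base ("_" ++ y) = true
    · rw [List.find?_cons_of_pos (by simpa using h)] at hf
      obtain rfl : y = a := by simpa using hf
      intro x hx _
      rw [List.mem_cons] at hx
      rcases hx with rfl | hx
      · exact le_refl _
      · exact hp.1 x hx
    · rw [List.find?_cons_of_neg (by simpa using h)] at hf
      intro x hx hpx
      rw [List.mem_cons] at hx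
      rcases hx with rfl | hx
      · exact absurd hpx h
      · exact ih hp.2 hf x hx hpx

-- B's fold invariant: the accumulator ends as a longest match (first one on ties)
theorem pv_fold_spec (base : String) (l : List String) : ∀ (acc : Option String),
    (l.foldl (pvStep base) acc = none ↔
        acc = none ∧ ∀ x ∈ l, ¬ PySem.Str.endswith base ("_" ++ x) = true) ∧
    (∀ b, l.foldl (pvStep base) acc = some b →
        ((PySem.Str.endswith base ("_" ++ b) = true ∧ b ∈ l) ∨ acc = some b) ∧
        (∀ x ∈ l, PySem.Str.endswith base ("_" ++ x) = true → PySem.Str.len x ≤ PySem.Str.len b) ∧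
        (∀ a, acc = some a → PySem.Str.len a ≤ PySem.Str.len b)) := by
  induction l with
  | nil =>
    intro acc
    refine ⟨by simp, ?_⟩
    intro b hb
    simp only [List.foldl_nil] at hb
    refine ⟨Or.inr hb, by simp, ?_⟩
    intro a ha
    rw [hb] at ha
    obtain rfl : b = a := by simpa using ha
    exact le_refl _
  | cons x l ih =>
    intro acc
    simp only [List.foldl_cons]
    by_cases hpx : PySem.Str.endswith base ("_" ++ x) = true
    · have hpx' : PySem.Chars.endswith base.toList ('_' :: x.toList) = true := by simpa using hpx
      cases acc with
      | none =>
        have hstep : pvStep base none x = some x := by simp [pvStep, hpx']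
        rw [hstep]
        obtain ⟨IH1, IH2⟩ := ih (some x)
        constructor
        · rw [IH1]; simp [hpx']
        · intro b hb
          obtain ⟨H1, H2, H3⟩ := IH2 b hb
          refine ⟨?_, ?_, ?_⟩
          · rcases H1 with ⟨hpb, hbl⟩ | hax
            · exact Or.inl ⟨hpb, List.mem_cons_of_mem _ hbl⟩
            · obtain rfl : x = b := by simpa using hax
              exact Or.inl ⟨hpx, List.mem_cons_self⟩
          · intro y hy hpy
            rw [List.mem_cons] at hy
            rcases hy with rfl | hy
            · exact H3 y rfl
            · exact H2 y hy hpy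
          · intro a ha; simp at ha
      | some a0 =>
        by_cases hlt : PySem.Str.len a0 < PySem.Str.len x
        · have hlt' : a0.length < x.length := by simpa [PySem.Str.len_eq] using hlt
          have hstep : pvStep base (some a0) x = some x := by simp [pvStep, hpx', hlt']
          rw [hstep]
          obtain ⟨IH1, IH2⟩ := ih (some x)
          constructor
          · rw [IH1]; simp
          · intro b hb
            obtain ⟨H1, H2, H3⟩ := IH2 b hb
            refine ⟨?_, ?_, ?_⟩
            · rcases H1 with ⟨hpb, hbl⟩ | hax
              · exact Or.inl ⟨hpb, List.mem_cons_of_mem _ hbl⟩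
              · obtain rfl : x = b := by simpa using hax
                exact Or.inl ⟨hpx, List.mem_cons_self⟩
            · intro y hy hpy
              rw [List.mem_cons] at hy
              rcases hy with rfl | hy
              · exact H3 y rfl
              · exact H2 y hy hpy
            · intro a ha
              obtain rfl : a0 = a := by simpa using ha
              exact le_trans (le_of_lt hlt) (H3 x rfl)
        · have hlt' : ¬ a0.length < x.length := by simpa [PySem.Str.len_eq] using hlt
          have hstep : pvStep base (some a0) x = some a0 := by simp [pvStep, hpx', hlt']
          rw [hstep]
          obtain ⟨IH1, IH2⟩ := ih (some a0)
          constructor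
          · rw [IH1]; simp
          · intro b hb
            obtain ⟨H1, H2, H3⟩ := IH2 b hb
            refine ⟨?_, ?_, ?_⟩
            · rcases H1 with ⟨hpb, hbl⟩ | hax
              · exact Or.inl ⟨hpb, List.mem_cons_of_mem _ hbl⟩
              · exact Or.inr hax
            · intro y hy hpy
              rw [List.mem_cons] at hy
              rcases hy with rfl | hy
              · exact le_trans (le_of_not_gt hlt) (H3 a0 rfl)
              · exact H2 y hy hpy
            · intro a ha
              obtain rfl : a0 = a := by simpa using ha
              exact H3 a0 rfl
    · have hpx' : PySem.Chars.endswith base.toList ('_' :: x.toList) = false := by simpa using hpx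
      have hstep : pvStep base acc x = acc := by
        cases acc <;> simp [pvStep, hpx']
      rw [hstep]
      obtain ⟨IH1, IH2⟩ := ih acc
      constructor
      · rw [IH1]; simp [hpx']
      · intro b hb
        obtain ⟨H1, H2, H3⟩ := IH2 b hb
        refine ⟨?_, ?_, H3⟩
        · rcases H1 with ⟨hpb, hbl⟩ | hax
          · exact Or.inl ⟨hpb, List.mem_cons_of_mem _ hbl⟩
          · exact Or.inr hax
        · intro y hy hpy
          rw [List.mem_cons] at hy
          rcases hy with rfl | hy
          · exact absurd hpy hpx
          · exact H2 y hy hpy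

-- A's first match over the length-desc-sorted list = B's single pass
theorem pv_key (base : String) (l : List String) :
    (PySem.List.sorted l (fun m => PySem.Str.len m) true).find?
      (fun x => PySem.Str.endswith base ("_" ++ x)) = pvBBest base l := by
  have hpw := PySem.List.sorted_pairwise_rev (xs := l) (key := fun m => PySem.Str.len m)
  have hmem : ∀ x : String, x ∈ PySem.List.sorted l (fun m => PySem.Str.len m) true ↔ x ∈ l :=
    fun x => PySem.List.mem_sorted _ _ _ _
  obtain ⟨B1, B2⟩ := pv_fold_spec base l none
  rw [pvBBest_eq]
  cases hA : (PySem.List.sorted l (fun m => PySem.Str.len m) true).find?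
      (fun x => PySem.Str.endswith base ("_" ++ x)) with
  | none =>
    have hnone : ∀ x ∈ l, ¬ PySem.Str.endswith base ("_" ++ x) = true := by
      intro x hx
      have := List.find?_eq_none.mp hA x ((hmem x).mpr hx)
      simpa using this
    cases hB : l.foldl (pvStep base) none with
    | none => rfl
    | some b =>
      obtain ⟨H1, _, _⟩ := B2 b hB
      rcases H1 with ⟨hpb, hbl⟩ | hax
      · exact absurd hpb (hnone b hbl)
      · simp at hax
  | some a =>
    have hpa : PySem.Str.endswith base ("_" ++ a) = true := by
      have := List.find?_some hA; simpa using this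
    have hal : a ∈ l := (hmem a).mp (List.mem_of_find?_eq_some hA)
    cases hB : l.foldl (pvStep base) none with
    | none =>
      exact absurd hpa ((B1.mp hB).2 a hal)
    | some b =>
      obtain ⟨H1, H2, _⟩ := B2 b hB
      have hpb : PySem.Str.endswith base ("_" ++ b) = true ∧ b ∈ l := by
        rcases H1 with h | h
        · exact h
        · simp at h
      have h1 : PySem.Str.len b ≤ PySem.Str.len a :=
        pv_find?_max base _ a hpw hA b ((hmem b).mpr hpb.2) hpb.1
      have h2 : PySem.Str.len a ≤ PySem.Str.len b := H2 a hal hpa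
      exact congrArg some (pv_match_eq base a b hpa hpb.1 (le_antisymm h2 h1))

-- ===== VERDICT (by name: the statement is the Claim_ definition above) =====
theorem infer_template_from_id_py_spec : Claim_equal_infer_template_from_id_py := by
  intro doc_id kts mids _
  unfold Spec_infer_template_from_id_py infer_template_from_id_py infer_template_from_id_py_alt
  rw [pvAStripLoop_eq_find?, pvAFindLoop_eq_find?, pv_key, pv_key]
  cases h : pvBBest doc_id mids with
  | none => rfl
  | some b =>
    simp only []
    congr 2
    simp [PySem.Str.len_eq, String.toList_append]
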